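-- pv_equiv track=rewrite | github.com/jwg4/Dantz | python/dantz_search.py | build_search_input
-- ===== SOURCE A (Python) =====
-- def build_search_input(vectors):
--     vectors = list(vectors)
--     points = sorted(list(set([ p for v in vectors for p in v ])))
--     names = [ str(p) for p in points ]
--     rows = [
--         [ (1 if p in v else 0) for p in points ]
--         for v in vectors
--     ]
--     return names, rows
-- ===== SOURCE B (Python) =====
-- def build_search_input(vectors):
--     vectors = list(vectors)
--     flat = sorted(p for v in vectors for p in v)
--     points = [p for i, p in enumerate(flat) if i == 0 or flat[i - 1] != p]
--     index = {p: i for i, p in enumerate(points)}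
--     names = [str(p) for p in points]
--     rows = []
--     for v in vectors:
--         row = [0] * len(points)
--         for p in v:
--             row[index[p]] = 1
--         rows.append(row)
--     return names, rows
-- ===== Notes on version B (the rewrite author's own statement) =====
-- stated objective: faster
-- what changed: B sorts the flattened multiset and deduplicates adjacent duplicates (instead of set-then-sort), builds a point-to-column index dict once, and fills each row by scattering 1s from the vector's own elements into a fresh zero row instead of testing every sorted point for membership in the vector.
import Mathlib
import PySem

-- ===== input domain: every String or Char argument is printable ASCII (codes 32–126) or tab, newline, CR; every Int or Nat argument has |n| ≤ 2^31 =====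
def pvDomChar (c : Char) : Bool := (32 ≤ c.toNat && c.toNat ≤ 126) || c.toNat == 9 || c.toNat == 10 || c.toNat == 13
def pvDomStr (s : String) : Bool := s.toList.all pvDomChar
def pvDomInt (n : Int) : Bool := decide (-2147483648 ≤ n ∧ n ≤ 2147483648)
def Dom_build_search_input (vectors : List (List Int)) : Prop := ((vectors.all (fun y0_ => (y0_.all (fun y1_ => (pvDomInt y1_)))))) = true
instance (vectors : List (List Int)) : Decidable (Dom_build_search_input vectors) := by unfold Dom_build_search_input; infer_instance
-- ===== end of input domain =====

-- B sorts the flattened list and drops adjacent duplicates instead of set-then-sort, and fills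
-- each row by scattering 1s through a point→column index dict instead of per-point membership
-- tests (objective: faster; no per-point membership scan).

-- ===== PORT A =====
def build_search_input (vectors : List (List Int)) : List String × List (List Int) :=
  let points := PySem.List.sorted (PySem.Set.ofList (vectors.flatMap (fun v => v))) (fun p => p) false
  let names := points.map (fun p => PySem.Int.toStr p)
  let rows := vectors.map (fun v => points.map (fun p => if v.contains p then (1 : Int) else 0))
  (names, rows)

-- ===== PORT B =====
-- [p for i, p in enumerate(flat) if i == 0 or flat[i-1] != p]: keep an element unless it
-- equals its predecessor (exact for the comprehension, element by element)
def pvDedup : List Int → List Int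
  | [] => []
  | [x] => [x]
  | x :: y :: t => if x = y then pvDedup (y :: t) else x :: pvDedup (y :: t)

-- {p: i for i, p in enumerate(points)}
def pvIndexFrom (i : Int) (ps : List Int) (d : PySem.Dict Int Int) : PySem.Dict Int Int :=
  match ps with
  | [] => d
  | p :: t => pvIndexFrom (i + 1) t (d.insert p i)

-- [str(p) for p in points]
def pvNames : List Int → List String
  | [] => []
  | p :: t => PySem.Int.toStr p :: pvNames t

-- for p in v: row[index[p]] = 1  (index[p] always hits and is in range, so getD/pySetD are exact)
def pvScatter (idx : PySem.Dict Int Int) (row : List Int) : List Int → List Int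
  | [] => row
  | p :: t => pvScatter idx (PySem.List.pySetD row (idx.getD p 0) 1) t

-- for v in vectors: rows.append(scattered fresh zero row)
def pvRows (idx : PySem.Dict Int Int) (n : Nat) : List (List Int) → List (List Int)
  | [] => []
  | v :: t => pvScatter idx (List.replicate n 0) v :: pvRows idx n t

def build_search_input_alt (vectors : List (List Int)) : List String × List (List Int) :=
  let flat := PySem.List.sorted (vectors.flatMap (fun v => v)) (fun p => p) false
  let points := pvDedup flat
  let idx := pvIndexFrom 0 points PySem.Dict.empty
  (pvNames points, pvRows idx points.length vectors)

-- ===== PRECONDITION & SPEC =====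
def Spec_build_search_input (vectors : List (List Int)) (out : List String × List (List Int)) : Prop := out = build_search_input_alt vectors
instance (vectors : List (List Int)) (out : List String × List (List Int)) : Decidable (Spec_build_search_input vectors out) := by unfold Spec_build_search_input; infer_instance

-- ===== CLAIM =====
def Claim_equal_build_search_input : Prop := ∀ (vectors : List (List Int)), Dom_build_search_input vectors → Spec_build_search_input vectors (build_search_input vectors)

-- ===== LEMMAS AND PROOFS =====

theorem mem_pvDedup (l : List Int) (x : Int) : x ∈ pvDedup l ↔ x ∈ l := by
  induction l with
  | nil => simp [pvDedup]
  | cons a t ih =>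
    cases t with
    | nil => simp [pvDedup]
    | cons b u =>
      by_cases h : a = b
      · simp only [pvDedup, if_pos h]
        rw [ih]
        subst h
        simp
      · simp only [pvDedup, if_neg h]
        simp only [List.mem_cons] at *
        rw [ih]

theorem pairwise_lt_pvDedup (l : List Int) (h : l.Pairwise (· ≤ ·)) :
    (pvDedup l).Pairwise (· < ·) := by
  induction l with
  | nil => simp [pvDedup]
  | cons a t ih =>
    cases t with
    | nil => simp [pvDedup]
    | cons b u =>
      have hle := List.pairwise_cons.mp h
      have h' := hle.2
      by_cases hab : a = b
      · simpa only [pvDedup, if_pos hab] using ih h'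
      · simp only [pvDedup, if_neg hab]
        refine List.pairwise_cons.mpr ⟨?_, ih h'⟩
        intro z hz
        have hzbu : z ∈ b :: u := (mem_pvDedup _ _).mp hz
        have hbz : b ≤ z := by
          rcases List.mem_cons.mp hzbu with rfl | hzu
          · exact le_refl _
          · exact (List.pairwise_cons.mp h').1 z hzu
        have hab' : a ≤ b := hle.1 b List.mem_cons_self
        exact lt_of_lt_of_le (lt_of_le_of_ne hab' hab) hbz

theorem pvNames_eq_map (ps : List Int) : pvNames ps = ps.map (fun p => PySem.Int.toStr p) := by
  induction ps with
  | nil => rfl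
  | cons p t ih => simp [pvNames, ih]

theorem pvIndexFrom_getD_not_mem (t : List Int) (p : Int) (hp : p ∉ t) :
    ∀ (i : Int) (d : PySem.Dict Int Int), (pvIndexFrom i t d).getD p 0 = d.getD p 0 := by
  induction t with
  | nil => intro i d; rfl
  | cons q u ih =>
    intro i d
    have hpq : p ≠ q := fun h => hp (h ▸ List.mem_cons_self)
    have hpu : p ∉ u := fun h => hp (List.mem_cons_of_mem _ h)
    rw [pvIndexFrom, ih hpu, PySem.Dict.getD_insert, if_neg hpq]

theorem pvIndexFrom_getD (ps : List Int) (hnd : ps.Nodup) :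
    ∀ (i : Int) (d : PySem.Dict Int Int) (k : Nat) (hk : k < ps.length),
      (pvIndexFrom i ps d).getD ps[k] 0 = i + k := by
  induction ps with
  | nil => intro i d k hk; simp at hk
  | cons p t ih =>
    intro i d k hk
    have hnd' := List.nodup_cons.mp hnd
    cases k with
    | zero =>
      simp only [List.getElem_cons_zero, pvIndexFrom]
      rw [pvIndexFrom_getD_not_mem t p hnd'.1, PySem.Dict.getD_insert, if_pos rfl]
      simp
    | succ m =>
      have hm : m < t.length := by simpa using hk
      simp only [List.getElem_cons_succ, pvIndexFrom]
      rw [ih hnd'.2 (i + 1) (d.insert p i) m hm]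
      push_cast
      ring

theorem pvScatter_spec (points : List Int) (idx : PySem.Dict Int Int)
    (hf : ∀ (i : Nat) (hi : i < points.length), idx.getD points[i] 0 = (i : Int))
    (hnd : points.Nodup) :
    ∀ (v row : List Int), row.length = points.length → (∀ p ∈ v, p ∈ points) →
      (pvScatter idx row v).length = points.length ∧
      ∀ (j : Nat) (hj : j < points.length),
        (pvScatter idx row v)[j]? =
          (if v.contains (points[j]'hj) then some 1 else row[j]?) := by
  intro v
  induction v with
  | nil =>
    intro row hrow hmem
    exact ⟨hrow, by intro j hj; simp [pvScatter]⟩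
  | cons p t ih =>
    intro row hrow hmem
    have hp : p ∈ points := hmem p List.mem_cons_self
    obtain ⟨i, hi, hpi⟩ := List.mem_iff_getElem.mp hp
    have hstep : PySem.List.pySetD row (idx.getD p 0) 1 = row.set i 1 := by
      rw [← hpi, hf i hi, PySem.List.pySetD_natCast]
    have hrow' : (row.set i 1).length = points.length := by simpa using hrow
    have hmem' : ∀ q ∈ t, q ∈ points := fun q hq => hmem q (List.mem_cons_of_mem _ hq)
    obtain ⟨hlen, hget⟩ := ih (row.set i 1) hrow' hmem'
    refine ⟨by simpa [pvScatter, hstep] using hlen, ?_⟩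
    intro j hj
    show (pvScatter idx (PySem.List.pySetD row (idx.getD p 0) 1) t)[j]? = _
    rw [hstep, hget j hj]
    have hjrow : j < row.length := by omega
    have hset : (row.set i 1)[j]? = if i = j then some 1 else row[j]? := by
      rw [List.getElem?_set]
      by_cases h : i = j
      · simp [h, hjrow]
      · simp [h]
    by_cases hjt : (points[j]'hj) ∈ t
    · simp [hjt]
    · by_cases hij : i = j
      · subst hij
        simp [hset, hpi]
      · have hnp : (points[j]'hj) ≠ p := by
          rw [← hpi]
          intro h
          exact hij ((List.Nodup.getElem_inj_iff hnd).mp h.symm)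
        simp [hjt, hset, hij, hnp]

theorem pvRows_eq (pts : List Int) (idx : PySem.Dict Int Int)
    (hf : ∀ (i : Nat) (hi : i < pts.length), idx.getD pts[i] 0 = (i : Int))
    (hnd : pts.Nodup) :
    ∀ (ws : List (List Int)), (∀ v ∈ ws, ∀ p ∈ v, p ∈ pts) →
      ws.map (fun v => pts.map (fun p => if v.contains p then (1 : Int) else 0)) =
        pvRows idx pts.length ws := by
  intro ws
  induction ws with
  | nil => intro _; rfl
  | cons v t ih =>
    intro hmem
    simp only [List.map_cons, pvRows]
    refine List.cons_eq_cons.mpr ⟨?_, ih (fun w hw => hmem w (List.mem_cons_of_mem _ hw))⟩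
    have hvp : ∀ p ∈ v, p ∈ pts := hmem v List.mem_cons_self
    obtain ⟨hlen, hget⟩ := pvScatter_spec pts idx hf hnd
        v (List.replicate pts.length 0) (by simp) hvp
    apply List.ext_getElem?
    intro j
    by_cases hj : j < pts.length
    · rw [hget j hj, List.getElem?_map, List.getElem?_eq_getElem hj]
      by_cases hc : (pts[j]'hj) ∈ v
      · simp [hc]
      · simp [hc, hj]
    · have h1 : (pts.map (fun p => if v.contains p then (1 : Int) else 0))[j]? = none := by
        rw [List.getElem?_eq_none_iff]
        simpa using Nat.le_of_not_lt hj
      have h2 : (pvScatter idx (List.replicate pts.length (0 : Int)) v)[j]? = none := by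
        rw [List.getElem?_eq_none_iff]
        omega
      exact h1.trans h2.symm

-- ===== VERDICT =====
theorem build_search_input_spec : Claim_equal_build_search_input := by
  intro vectors _
  unfold Spec_build_search_input build_search_input build_search_input_alt
  dsimp only
  set flat0 := vectors.flatMap (fun v => v) with hflat0
  set ptsB := pvDedup (PySem.List.sorted flat0 (fun p => p) false) with hptsB
  have hle : (PySem.List.sorted flat0 (fun p => p) false).Pairwise (· ≤ ·) :=
    PySem.List.sorted_pairwise flat0 (fun p => p)
  have hlt : ptsB.Pairwise (· < ·) := pairwise_lt_pvDedup _ hle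
  have hndB : ptsB.Nodup := hlt.imp ne_of_lt
  have hmemB : ∀ x, x ∈ ptsB ↔ x ∈ flat0 := by
    intro x
    rw [hptsB, mem_pvDedup, PySem.List.mem_sorted]
  have hperm : ptsB.Perm (PySem.Set.ofList flat0) := by
    rw [List.perm_ext_iff_of_nodup hndB (PySem.Set.nodup_ofList flat0)]
    intro x
    rw [hmemB, PySem.Set.mem_ofList]
  have hpts : PySem.List.sorted (PySem.Set.ofList flat0) (fun p => p) false = ptsB :=
    PySem.List.sorted_eq_of_perm_of_pairwise_lt _ _ (fun p => p) hperm hlt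
  rw [hpts]
  refine Prod.ext (pvNames_eq_map ptsB).symm ?_
  dsimp only
  have hf : ∀ (i : Nat) (hi : i < ptsB.length),
      (pvIndexFrom 0 ptsB PySem.Dict.empty).getD ptsB[i] 0 = (i : Int) := by
    intro i hi
    rw [pvIndexFrom_getD ptsB hndB 0 PySem.Dict.empty i hi]
    simp
  refine pvRows_eq ptsB _ hf hndB vectors ?_
  intro v hv p hp
  rw [hmemB, hflat0]
  exact List.mem_flatMap.mpr ⟨v, hv, hp⟩
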